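-- pv_equiv track=rewrite | github.com/Bruno-Muller/kuju2gltf | main_window.py | _parse_dnd_paths
-- ===== SOURCE A (Python) =====
-- def _parse_dnd_paths(raw: str) -> list:
--     """Parse space-separated file paths from tkinterdnd2; handles brace-quoted paths."""
--     paths = []
--     raw = raw.strip()
--     i = 0
--     while i < len(raw):
--         if raw[i] == '{':
--             end = raw.find('}', i + 1)
--             if end == -1:
--                 paths.append(raw[i + 1:])
--                 break
--             paths.append(raw[i + 1:end])
--             i = end + 1
--         else:
--             end = raw.find(' ', i)
--             if end == -1:
--                 paths.append(raw[i:])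
--                 break
--             paths.append(raw[i:end])
--             i = end
--         while i < len(raw) and raw[i] == ' ':
--             i += 1
--     return [p for p in paths if p]
-- ===== SOURCE B (Python) =====
-- def _parse_dnd_paths(raw: str) -> list:
--     """Single-pass character state machine: IDLE / PLAIN / BRACE with a token buffer."""
--     paths = []
--     mode = 0  # 0 = idle, 1 = plain token, 2 = brace-quoted token
--     buf = []
--     for ch in raw.strip():
--         if mode == 0:
--             if ch == ' ':
--                 continue
--             elif ch == '{':
--                 mode = 2
--                 buf = []
--             else:
--                 mode = 1
--                 buf = [ch]
--         elif mode == 2: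
--             if ch == '}':
--                 paths.append(''.join(buf))
--                 mode = 0
--                 buf = []
--             else:
--                 buf.append(ch)
--         else:
--             if ch == ' ':
--                 paths.append(''.join(buf))
--                 mode = 0
--                 buf = []
--             else:
--                 buf.append(ch)
--     if mode != 0:
--         paths.append(''.join(buf))
--     return [p for p in paths if p]
-- ===== Notes on version B (the rewrite author's own statement) =====
-- stated objective: alternative
-- what changed: Replaced A's index-jumping loop (repeated str.find calls and slicing, plus an inner space-skipping while loop) by a single left-to-right character state machine (idle / plain token / brace-quoted token) with an explicit token buffer.
import Mathlib
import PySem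

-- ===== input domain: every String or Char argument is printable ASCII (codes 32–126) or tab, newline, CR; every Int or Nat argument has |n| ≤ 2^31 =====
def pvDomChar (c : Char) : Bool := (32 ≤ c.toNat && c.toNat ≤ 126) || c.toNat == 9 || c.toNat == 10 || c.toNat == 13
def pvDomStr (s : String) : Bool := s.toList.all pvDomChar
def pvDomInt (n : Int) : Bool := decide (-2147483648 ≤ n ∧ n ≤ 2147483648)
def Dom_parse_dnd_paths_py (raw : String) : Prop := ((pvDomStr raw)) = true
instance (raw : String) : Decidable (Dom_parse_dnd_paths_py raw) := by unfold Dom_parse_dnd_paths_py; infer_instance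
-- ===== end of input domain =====

-- B replaces A's index-jumping find/slice loop by a single-pass character state machine
-- (idle / plain token / brace-quoted token) with an explicit buffer; objective: alternative.

-- ===== PORT A =====
-- A-side termination helpers, cited by name in the port's termination proof.

-- inner `while i < len(raw) and raw[i] == ' '` loop of A
def skipSpacesA (r : List Char) (i : Nat) : Nat :=
  if h : i < r.length then
    if r[i] = ' ' then skipSpacesA r (i + 1) else i
  else i
termination_by r.length - i

lemma skipSpacesA_ge (r : List Char) (i : Nat) : i ≤ skipSpacesA r i := by
  rw [skipSpacesA]
  split
  · split
    · exact le_trans (by omega) (skipSpacesA_ge r (i + 1))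
    · exact le_refl i
  · exact le_refl i
termination_by r.length - i

-- generalized `find.go` for a single-character needle
lemma go_single (c : Char) : ∀ (cs : List Char) (k : Nat),
    PySem.Chars.find.go [c] cs k =
      if c ∈ cs then ((k + (cs.takeWhile (· ≠ c)).length : Nat) : Int) else -1 := by
  intro cs
  induction cs with
  | nil => intro k; simp [PySem.Chars.find.go]
  | cons h t ih =>
    intro k
    rw [PySem.Chars.find.go]
    by_cases hc : h = c
    · subst hc; simp [List.isPrefixOf]
    · simp only [List.isPrefixOf, Bool.and_true, List.mem_cons, List.takeWhile_cons]
      have h1 : (c == h) = false := by simp [Ne.symm hc]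
      have h2 : decide (h ≠ c) = true := by simp [hc]
      simp only [h1, h2, Bool.false_eq_true, if_false, if_true, ih (k + 1), List.length_cons]
      by_cases hm : c ∈ t
      · simp [hm, Ne.symm hc]; omega
      · simp [hm, Ne.symm hc]

lemma find_single (cs : List Char) (c : Char) :
    PySem.Chars.find cs [c] =
      if c ∈ cs then (((cs.takeWhile (· ≠ c)).length : Nat) : Int) else -1 := by
  have := go_single c cs 0
  simpa [PySem.Chars.find] using this

-- `raw.find(c, k)` in terms of the suffix `r.drop k`
lemma findFrom_single (r : List Char) (c : Char) (k : Nat) (hk : k ≤ r.length) :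
    PySem.Chars.findFrom r [c] (k : Int) none =
      if c ∈ r.drop k then ((k + ((r.drop k).takeWhile (· ≠ c)).length : Nat) : Int) else -1 := by
  rw [PySem.Chars.findFrom_natCast r [c] k hk, find_single]
  by_cases hm : c ∈ r.drop k
  · simp [hm]
  · simp [hm]

-- membership splits a list at the first occurrence
lemma mem_split_takeWhile (c : Char) : ∀ (cs : List Char), c ∈ cs →
    cs = cs.takeWhile (· ≠ c) ++ c :: (cs.dropWhile (· ≠ c)).tail := by
  intro cs
  induction cs with
  | nil => intro h; cases h
  | cons h t ih =>
    intro hm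
    by_cases hc : h = c
    · subst hc; simp
    · have hm' : c ∈ t := by
        rcases List.mem_cons.mp hm with h1 | h1
        · exact absurd h1.symm hc
        · exact h1
      have h2 : decide (h ≠ c) = true := by simp [hc]
      simp only [List.takeWhile_cons, List.dropWhile_cons, h2, if_true, List.cons_append]
      exact congrArg (h :: ·) (ih hm')

lemma skipSpacesA_gt_of_space (r : List Char) (i : Nat) (xs : List Char)
    (h : r.drop i = ' ' :: xs) : i + 1 ≤ skipSpacesA r i := by
  have hlt : i < r.length := by
    by_contra hc
    have : r.drop i = [] := List.drop_eq_nil_of_le (by omega)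
    rw [this] at h; cases h
  have hsp : r[i] = ' ' := by
    have h0 : (r.drop i)[0]'(by simp [h]) = ' ' := by simp [h]
    rw [List.getElem_drop] at h0
    simpa using h0
  rw [skipSpacesA, dif_pos hlt, if_pos hsp]
  exact skipSpacesA_ge r (i + 1)

-- main `while` loop of A; i: current index, paths: accumulated tokens
def loopA (r : List Char) (i : Nat) (paths : List String) : List String :=
  if h : i < r.length then
    if r[i] = '{' then
      let e := PySem.Chars.findFrom r ['}'] ((i + 1 : Nat) : Int) none
      if he : e = -1 then
        paths ++ [String.ofList (PySem.List.slice r (some ((i + 1 : Nat) : Int)) none)]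
      else
        loopA r (skipSpacesA r (e.toNat + 1))
          (paths ++ [String.ofList (PySem.List.slice r (some ((i + 1 : Nat) : Int)) (some e))])
    else
      let e := PySem.Chars.findFrom r [' '] ((i : Nat) : Int) none
      if he : e = -1 then
        paths ++ [String.ofList (PySem.List.slice r (some ((i : Nat) : Int)) none)]
      else
        loopA r (skipSpacesA r e.toNat)
          (paths ++ [String.ofList (PySem.List.slice r (some ((i : Nat) : Int)) (some e))])
  else paths
termination_by r.length - i
decreasing_by
  · -- brace branch: the found '}' is at index ≥ i+1, next i is past it
    rename_i he
    have hk : i + 1 ≤ r.length := by omega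
    have he' : PySem.Chars.findFrom r ['}'] ((i + 1 : Nat) : Int) none ≠ -1 := he
    rw [findFrom_single r '}' (i + 1) hk] at he'
    rw [findFrom_single r '}' (i + 1) hk]
    by_cases hm : '}' ∈ r.drop (i + 1)
    · simp only [hm, if_true, Int.toNat_natCast]
      have hge := skipSpacesA_ge r (i + 1 + ((r.drop (i+1)).takeWhile (· ≠ '}')).length + 1)
      omega
    · simp [hm] at he'
  · -- plain branch: the found ' ' is at index ≥ i, skipSpaces advances past it
    rename_i he
    have hk : i ≤ r.length := by omega
    have he' : PySem.Chars.findFrom r [' '] ((i : Nat) : Int) none ≠ -1 := he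
    rw [findFrom_single r ' ' i hk] at he'
    rw [findFrom_single r ' ' i hk]
    by_cases hm : ' ' ∈ r.drop i
    · simp only [hm, if_true, Int.toNat_natCast]
      set t := ((r.drop i).takeWhile (· ≠ ' ')).length with ht
      have hsplit := mem_split_takeWhile ' ' (r.drop i) hm
      have hdrop : r.drop (i + t) = ' ' :: ((r.drop i).dropWhile (· ≠ ' ')).tail := by
        have hdd : r.drop (i + t) = (r.drop i).drop t := by rw [List.drop_drop]
        rw [hdd]
        conv_lhs => rw [hsplit]
        rw [ht, List.drop_left]
      have hgt := skipSpacesA_gt_of_space r (i + t) _ hdrop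
      omega
    · simp [hm] at he'

def parse_dnd_paths_py (raw : String) : List String :=
  (loopA (PySem.Str.strip raw).toList 0 []).filter (fun p => !(p == ""))

-- ===== PORT B =====
-- one step of the state machine; state = (paths, mode, buf), mode 0 = idle, 1 = plain, 2 = brace
def stepB (st : List String × Nat × List Char) (ch : Char) : List String × Nat × List Char :=
  match st with
  | (paths, mode, buf) =>
    if mode = 0 then
      if ch = ' ' then (paths, mode, buf)
      else if ch = '{' then (paths, 2, [])
      else (paths, 1, [ch])
    else if mode = 2 then
      if ch = '}' then (paths ++ [String.ofList buf], 0, [])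
      else (paths, mode, buf ++ [ch])
    else
      if ch = ' ' then (paths ++ [String.ofList buf], 0, [])
      else (paths, mode, buf ++ [ch])

-- end-of-string flush of an in-progress token
def flushB (st : List String × Nat × List Char) : List String :=
  match st with
  | (paths, mode, buf) => if mode ≠ 0 then paths ++ [String.ofList buf] else paths

def parse_dnd_paths_py_alt (raw : String) : List String :=
  (flushB (((PySem.Str.strip raw).toList).foldl stepB ([], 0, []))).filter (fun p => !(p == ""))

-- ===== PRECONDITION & SPEC =====
def Spec_parse_dnd_paths_py (raw : String) (out : List String) : Prop := out = parse_dnd_paths_py_alt raw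
instance (raw : String) (out : List String) : Decidable (Spec_parse_dnd_paths_py raw out) := by unfold Spec_parse_dnd_paths_py; infer_instance

-- ===== CLAIM (what is proved, stated in full; the proofs are below) =====
def Claim_equal_parse_dnd_paths_py : Prop := ∀ (raw : String), Dom_parse_dnd_paths_py raw → Spec_parse_dnd_paths_py raw (parse_dnd_paths_py raw)

-- ===== LEMMAS AND PROOFS =====

-- the paths component of the state is append-only
lemma stepB_paths (p : List String) (m : Nat) (b : List Char) (c : Char) :
    stepB (p, m, b) c =
      (p ++ (stepB ([], m, b) c).1, (stepB ([], m, b) c).2.1, (stepB ([], m, b) c).2.2) := by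
  simp only [stepB]
  split_ifs <;> simp

lemma foldl_stepB_paths (cs : List Char) : ∀ (p : List String) (m : Nat) (b : List Char),
    cs.foldl stepB (p, m, b) =
      (p ++ (cs.foldl stepB ([], m, b)).1, (cs.foldl stepB ([], m, b)).2.1, (cs.foldl stepB ([], m, b)).2.2) := by
  induction cs with
  | nil => intro p m b; simp
  | cons c t ih =>
    intro p m b
    simp only [List.foldl_cons]
    rcases hst : stepB ([], m, b) c with ⟨p0, m0, b0⟩
    rw [stepB_paths p m b c, hst]
    simp only
    rw [ih (p ++ p0) m0 b0, ih p0 m0 b0]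
    simp

lemma flushB_foldl_paths (cs : List Char) (p : List String) (m : Nat) (b : List Char) :
    flushB (cs.foldl stepB (p, m, b)) = p ++ flushB (cs.foldl stepB ([], m, b)) := by
  rw [foldl_stepB_paths]
  rcases h : cs.foldl stepB ([], m, b) with ⟨p', m', b'⟩
  simp only [flushB]
  split <;> simp

-- idle state skips leading spaces
lemma foldl_idle_dropWhile (cs : List Char) (p : List String) (b : List Char) :
    (cs.dropWhile (· = ' ')).foldl stepB (p, 0, b) = cs.foldl stepB (p, 0, b) := by
  induction cs with
  | nil => simp
  | cons c t ih =>
    by_cases hsp : c = ' '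
    · subst hsp
      rw [List.dropWhile_cons_of_pos (by simp)]
      simp only [List.foldl_cons, stepB, if_pos rfl, if_true]
      exact ih
    · rw [List.dropWhile_cons_of_neg (by simp [hsp])]

-- brace mode accumulates until '}'
lemma foldl_mode2_no_rbrace (bs : List Char) (h : '}' ∉ bs) (p : List String) (b : List Char) :
    bs.foldl stepB (p, 2, b) = (p, 2, b ++ bs) := by
  induction bs generalizing b with
  | nil => simp
  | cons c t ih =>
    simp only [List.mem_cons, not_or] at h
    have hst : stepB (p, 2, b) c = (p, 2, b ++ [c]) := by simp [stepB, Ne.symm h.1]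
    rw [List.foldl_cons, hst, ih h.2]
    simp

lemma foldl_mode2_consume (tw after : List Char) (h : '}' ∉ tw) (p : List String) (b : List Char) :
    (tw ++ '}' :: after).foldl stepB (p, 2, b) = after.foldl stepB (p ++ [String.ofList (b ++ tw)], 0, []) := by
  induction tw generalizing b with
  | nil => simp [stepB]
  | cons c t ih =>
    simp only [List.mem_cons, not_or] at h
    have hst : stepB (p, 2, b) c = (p, 2, b ++ [c]) := by simp [stepB, Ne.symm h.1]
    rw [List.cons_append, List.foldl_cons, hst, ih h.2]
    simp

-- plain mode accumulates until ' '
lemma foldl_mode1_no_space (bs : List Char) (h : ' ' ∉ bs) (p : List String) (b : List Char) :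
    bs.foldl stepB (p, 1, b) = (p, 1, b ++ bs) := by
  induction bs generalizing b with
  | nil => simp
  | cons c t ih =>
    simp only [List.mem_cons, not_or] at h
    have hst : stepB (p, 1, b) c = (p, 1, b ++ [c]) := by simp [stepB, Ne.symm h.1]
    rw [List.foldl_cons, hst, ih h.2]
    simp

lemma foldl_mode1_consume (tw after : List Char) (h : ' ' ∉ tw) (p : List String) (b : List Char) :
    (tw ++ ' ' :: after).foldl stepB (p, 1, b) = after.foldl stepB (p ++ [String.ofList (b ++ tw)], 0, []) := by
  induction tw generalizing b with
  | nil => simp [stepB]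
  | cons c t ih =>
    simp only [List.mem_cons, not_or] at h
    have hst : stepB (p, 1, b) c = (p, 1, b ++ [c]) := by simp [stepB, Ne.symm h.1]
    rw [List.cons_append, List.foldl_cons, hst, ih h.2]
    simp

lemma skipSpacesA_le_len (r : List Char) (i : Nat) (hi : i ≤ r.length) : skipSpacesA r i ≤ r.length := by
  rw [skipSpacesA]
  split
  · split
    · exact skipSpacesA_le_len r (i + 1) (by omega)
    · exact hi
  · exact hi
termination_by r.length - i

lemma skipSpacesA_drop (r : List Char) (i : Nat) (hi : i ≤ r.length) :
    r.drop (skipSpacesA r i) = (r.drop i).dropWhile (· = ' ') := by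
  rw [skipSpacesA]
  split
  · rename_i hlt
    have hcons : r.drop i = r[i] :: r.drop (i + 1) := List.drop_eq_getElem_cons hlt
    split
    · rename_i hsp
      rw [skipSpacesA_drop r (i + 1) (by omega), hcons, hsp,
        List.dropWhile_cons_of_pos (by simp)]
    · rename_i hsp
      rw [hcons, List.dropWhile_cons_of_neg (by simp [hsp])]
  · rename_i hge
    have hi' : i = r.length := by omega
    subst hi'
    simp
termination_by r.length - i

-- main invariant: from any position, A's loop produces (up to the empty-token filter)
-- exactly the accumulated tokens plus B's state-machine run over the remaining suffix
lemma filter_empty_token (acc rest : List String) :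
    (acc ++ "" :: rest).filter (fun p => !(p == "")) = (acc ++ rest).filter (fun p => !(p == "")) := by
  simp [List.filter_append]

-- the two elaborations of the predicate `(· ≠ c)`
lemma ne_pred (c : Char) : (fun x : Char => decide (x ≠ c)) = (fun x => !decide (x = c)) := by
  funext x; simp [decide_not]

lemma loopA_eq (r : List Char) (n : Nat) : ∀ (i : Nat), r.length - i ≤ n → i ≤ r.length → ∀ (acc : List String),
    (loopA r i acc).filter (fun p => !(p == "")) =
      (acc ++ flushB ((r.drop i).foldl stepB ([], 0, []))).filter (fun p => !(p == "")) := by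
  induction n with
  | zero =>
    intro i hn hi acc
    have hieq : i = r.length := by omega
    subst hieq
    rw [loopA, dif_neg (lt_irrefl r.length)]
    simp [flushB]
  | succ n ih =>
    intro i hn hi acc
    by_cases h : i < r.length
    · rw [loopA, dif_pos h]
      have hcons : r.drop i = r[i] :: r.drop (i + 1) := List.drop_eq_getElem_cons h
      by_cases hbr : r[i] = '{'
      · -- brace branch
        rw [if_pos hbr]
        have hk : i + 1 ≤ r.length := by omega
        rw [findFrom_single r '}' (i + 1) hk]
        simp only [ne_pred]
        by_cases hm : '}' ∈ r.drop (i + 1)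
        · -- a closing brace exists
          set t := ((r.drop (i + 1)).takeWhile (fun x => !decide (x = '}'))).length with htdef
          have hne : ((i + 1 + t : Nat) : Int) ≠ -1 := by omega
          rw [if_pos hm, dif_neg hne]
          have hsplit := mem_split_takeWhile '}' (r.drop (i + 1)) hm
          simp only [ne_pred] at hsplit
          set after := ((r.drop (i + 1)).dropWhile (fun x => !decide (x = '}'))).tail with hadef
          have hlen : i + 1 + t + 1 ≤ r.length := by
            have hl := congrArg List.length hsplit
            simp at hl
            omega
          have hafter : r.drop (i + 1 + t + 1) = after := by
            have h1 : r.drop (i + 1 + t + 1) = (r.drop (i + 1)).drop (t + 1) := by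
              rw [List.drop_drop]; ring_nf
            rw [h1]
            conv_lhs => rw [hsplit, show ((r.drop (i+1)).takeWhile (fun x => !decide (x = '}'))) ++ '}' :: after
              = (((r.drop (i+1)).takeWhile (fun x => !decide (x = '}'))) ++ ['}']) ++ after by simp]
            have h2 : (((r.drop (i+1)).takeWhile (fun x => !decide (x = '}'))) ++ ['}']).length = t + 1 := by
              simp [htdef]
            rw [show t + 1 = (((r.drop (i+1)).takeWhile (fun x => !decide (x = '}'))) ++ ['}']).length from h2.symm,
              List.drop_left]
          have hnotin : '}' ∉ (r.drop (i + 1)).takeWhile (fun x => !decide (x = '}')) := by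
            intro hx
            have := List.mem_takeWhile_imp hx
            simp at this
          -- A's token is exactly the brace-quoted segment
          have htok : PySem.List.slice r (some ((i + 1 : Nat) : Int)) (some ((i + 1 + t : Nat) : Int))
              = (r.drop (i + 1)).takeWhile (fun x => !decide (x = '}')) := by
            rw [PySem.List.slice_natCast]
            have h3 : (i + 1 + t) - (i + 1) = t := by omega
            rw [h3]
            conv_lhs => rw [hsplit]
            rw [htdef, List.take_left]
          -- B consumes the brace-quoted segment in one emitted token
          have hB : (r.drop i).foldl stepB ([], 0, []) =
              after.foldl stepB ([String.ofList ((r.drop (i+1)).takeWhile (fun x => !decide (x = '}')))], 0, []) := by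
            rw [hcons, hbr, List.foldl_cons]
            have hst : stepB ([], 0, []) '{' = ([], 2, ([] : List Char)) := by simp [stepB]
            rw [hst]
            conv_lhs => rw [hsplit]
            rw [foldl_mode2_consume _ _ hnotin]
            simp
          -- next index of A
          have hi1 : i + 1 + t + 1 ≤ skipSpacesA r (i + 1 + t + 1) := skipSpacesA_ge r _
          have hi2 : skipSpacesA r (i + 1 + t + 1) ≤ r.length := skipSpacesA_le_len r _ hlen
          have hdropnext : r.drop (skipSpacesA r (i + 1 + t + 1)) = after.dropWhile (· = ' ') := by
            rw [skipSpacesA_drop r _ hlen, hafter]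
          simp only [Int.toNat_natCast]
          rw [ih (skipSpacesA r (i + 1 + t + 1)) (by omega) hi2, hdropnext, htok, hB,
            flushB_foldl_paths, foldl_idle_dropWhile,
            flushB_foldl_paths after [String.ofList ((r.drop (i+1)).takeWhile (fun x => !decide (x = '}')))] 0 []]
          simp
        · -- unterminated brace: token is the rest of the string
          rw [if_neg hm, dif_pos rfl]
          have htok : PySem.List.slice r (some ((i + 1 : Nat) : Int)) none = r.drop (i + 1) :=
            PySem.List.slice_from_natCast r (i + 1)
          have hB : (r.drop i).foldl stepB ([], 0, []) = ([], 2, r.drop (i + 1)) := by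
            rw [hcons, hbr, List.foldl_cons]
            have hst : stepB ([], 0, []) '{' = ([], 2, ([] : List Char)) := by simp [stepB]
            rw [hst, foldl_mode2_no_rbrace _ hm]
            simp
          rw [htok, hB]
          simp [flushB]
      · -- plain branch
        rw [if_neg hbr]
        have hk : i ≤ r.length := by omega
        rw [findFrom_single r ' ' i hk]
        simp only [ne_pred]
        by_cases hsp : r[i] = ' '
        · -- current char is a space: A emits an empty (filtered-out) token
          have hm : ' ' ∈ r.drop i := by rw [hcons, hsp]; simp
          have htw : (r.drop i).takeWhile (fun x => !decide (x = ' ')) = [] := by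
            rw [hcons, hsp, List.takeWhile_cons_of_neg (by simp)]
          have hne : ((i + ((r.drop i).takeWhile (fun x => !decide (x = ' '))).length : Nat) : Int) ≠ -1 := by
            omega
          rw [if_pos hm, dif_neg hne, htw]
          have hgt : i + 1 ≤ skipSpacesA r i := skipSpacesA_gt_of_space r i _ (by rw [hcons, hsp])
          have hle : skipSpacesA r i ≤ r.length := skipSpacesA_le_len r i hk
          have hdropnext : r.drop (skipSpacesA r i) = (r.drop i).dropWhile (· = ' ') :=
            skipSpacesA_drop r i hk
          have htok : PySem.List.slice r (some ((i : Nat) : Int)) (some ((i : Nat) : Int)) = [] := by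
            rw [PySem.List.slice_natCast]
            simp
          simp only [List.length_nil, Int.toNat_natCast, Nat.add_zero]
          rw [htok, ih (skipSpacesA r i) (by omega) hle, hdropnext, foldl_idle_dropWhile]
          rw [show String.ofList ([] : List Char) = "" from rfl]
          rw [show acc ++ [""] = acc ++ "" :: [] by simp, show (acc ++ "" :: []) ++
            flushB ((r.drop i).foldl stepB ([], 0, [])) = acc ++ "" ::
            flushB ((r.drop i).foldl stepB ([], 0, [])) by simp, filter_empty_token]
        · by_cases hm : ' ' ∈ r.drop i
          · -- token runs to the next space
            set t := ((r.drop i).takeWhile (fun x => !decide (x = ' '))).length with htdef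
            have hne : ((i + t : Nat) : Int) ≠ -1 := by omega
            rw [if_pos hm, dif_neg hne]
            have hsplit := mem_split_takeWhile ' ' (r.drop i) hm
            simp only [ne_pred] at hsplit
            set after := ((r.drop i).dropWhile (fun x => !decide (x = ' '))).tail with hadef
            have hlen : i + t + 1 ≤ r.length := by
              have hl := congrArg List.length hsplit
              simp at hl
              omega
            have htpos : 1 ≤ t := by
              rw [htdef, hcons, List.takeWhile_cons_of_pos (by simp [hsp])]
              simp
            have hdropt : r.drop (i + t) = ' ' :: after := by
              have h1 : r.drop (i + t) = (r.drop i).drop t := by rw [List.drop_drop]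
              rw [h1]
              conv_lhs => rw [hsplit]
              rw [htdef, List.drop_left]
            have hnotin : ' ' ∉ (r.drop i).takeWhile (fun x => !decide (x = ' ')) := by
              intro hx
              have := List.mem_takeWhile_imp hx
              simp at this
            have htok : PySem.List.slice r (some ((i : Nat) : Int)) (some ((i + t : Nat) : Int))
                = (r.drop i).takeWhile (fun x => !decide (x = ' ')) := by
              rw [PySem.List.slice_natCast]
              have h3 : (i + t) - i = t := by omega
              rw [h3]
              conv_lhs => rw [hsplit]
              rw [htdef, List.take_left]
            have hB : (r.drop i).foldl stepB ([], 0, []) =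
                after.foldl stepB ([String.ofList ((r.drop i).takeWhile (fun x => !decide (x = ' ')))], 0, []) := by
              rcases htww : (r.drop i).takeWhile (fun x => !decide (x = ' ')) with _ | ⟨c, tw2⟩
              · rw [htww] at htdef; simp [htdef] at htpos
              · have hc : c = r[i] := by
                  rw [hcons, List.takeWhile_cons_of_pos (by simp [hsp])] at htww
                  exact (List.cons.injEq _ _ _ _ ▸ htww).1.symm
                conv_lhs => rw [hsplit, htww]
                rw [List.cons_append, List.foldl_cons]
                have hst : stepB ([], 0, []) c = ([], 1, [c]) := by
                  subst hc; simp [stepB, hsp, hbr]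
                rw [hst]
                have hnotin2 : ' ' ∉ tw2 := by
                  intro hx; exact hnotin (htww ▸ List.mem_cons_of_mem c hx)
                rw [foldl_mode1_consume _ _ hnotin2]
                simp [htww]
            have hi1 : i + t + 1 ≤ skipSpacesA r (i + t) := by
              have := skipSpacesA_gt_of_space r (i + t) _ hdropt
              omega
            have hi2 : skipSpacesA r (i + t) ≤ r.length := skipSpacesA_le_len r _ (by omega)
            have hdropnext : r.drop (skipSpacesA r (i + t)) = after.dropWhile (· = ' ') := by
              rw [skipSpacesA_drop r _ (by omega), hdropt,
                List.dropWhile_cons_of_pos (by simp)]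
            simp only [Int.toNat_natCast]
            rw [ih (skipSpacesA r (i + t)) (by omega) hi2, hdropnext, htok, hB,
              flushB_foldl_paths, foldl_idle_dropWhile,
              flushB_foldl_paths after [String.ofList ((r.drop i).takeWhile (fun x => !decide (x = ' ')))] 0 []]
            simp
          · -- no further space: token runs to the end of the string
            rw [if_neg hm, dif_pos rfl]
            have htok : PySem.List.slice r (some ((i : Nat) : Int)) none = r.drop i :=
              PySem.List.slice_from_natCast r i
            have hB : (r.drop i).foldl stepB ([], 0, []) = ([], 1, r.drop i) := by
              conv_lhs => rw [hcons]
              rw [List.foldl_cons]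
              have hst : stepB ([], 0, []) r[i] = ([], 1, [r[i]]) := by
                simp [stepB, hsp, hbr]
              rw [hst, foldl_mode1_no_space]
              · rw [hcons]; simp
              · intro hx
                exact hm (hcons ▸ List.mem_cons_of_mem _ hx)
            rw [htok, hB]
            simp [flushB]
    · rw [loopA, dif_neg h]
      have hnil : r.drop i = [] := List.drop_eq_nil_of_le (by omega)
      rw [hnil]
      simp [flushB]

-- ===== VERDICT (by name: the statement is the Claim_ definition above) =====
theorem parse_dnd_paths_py_spec : Claim_equal_parse_dnd_paths_py := by
  intro raw _
  unfold Spec_parse_dnd_paths_py parse_dnd_paths_py parse_dnd_paths_py_alt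
  have := loopA_eq (PySem.Str.strip raw).toList (PySem.Str.strip raw).toList.length 0 (by omega) (by omega) []
  simpa using this
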